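-- pv_equiv track=rewrite | github.com/szfmsmdx/Sysight | sysight/analyzer/cli.py | _standalone_nsys_argv
-- ===== SOURCE A (Python) =====
-- def _standalone_nsys_argv(argv: list[str]) -> list[str] | None:
--     """Return args for top-level `sysight nsys ...`, preserving simple globals."""
--     prefix: list[str] = []
--     idx = 0
--     while idx < len(argv):
--         token = argv[idx]
--         if token == "nsys":
--             return prefix + argv[idx + 1:]
--         if token == "nsys-sql":
--             # nsys-sql is handled separately as a top-level command
--             return None
--         if token in ("--json", "--verbose", "-v"):
--             prefix.append(token)
--             idx += 1
--             continue
--         return None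
--     return None
-- ===== SOURCE B (Python) =====
-- _GLOBAL_FLAGS = ("--json", "--verbose", "-v")
--
--
-- def _standalone_nsys_argv(argv: "list[str]") -> "list[str] | None":
--     """Return args for top-level `sysight nsys ...`, preserving simple globals."""
--     # Search-then-validate: locate the first "nsys" separator, then check that
--     # everything before it is a global flag. Any blocker before "nsys"
--     # (including "nsys-sql") fails the validation, matching A's dispatch loop.
--     try:
--         i = argv.index("nsys")
--     except ValueError:
--         return None
--     head = argv[:i]
--     if all(t in _GLOBAL_FLAGS for t in head):
--         return head + argv[i + 1:]
--     return None
-- ===== Notes on version B (the rewrite author's own statement) =====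
-- stated objective: alternative
-- what changed: Instead of a left-to-right per-token dispatch loop, B first searches argv for the first 'nsys' separator (list.index) and then validates in a second pass that every token before it is a global flag, appending head + tail if so.
import Mathlib
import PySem

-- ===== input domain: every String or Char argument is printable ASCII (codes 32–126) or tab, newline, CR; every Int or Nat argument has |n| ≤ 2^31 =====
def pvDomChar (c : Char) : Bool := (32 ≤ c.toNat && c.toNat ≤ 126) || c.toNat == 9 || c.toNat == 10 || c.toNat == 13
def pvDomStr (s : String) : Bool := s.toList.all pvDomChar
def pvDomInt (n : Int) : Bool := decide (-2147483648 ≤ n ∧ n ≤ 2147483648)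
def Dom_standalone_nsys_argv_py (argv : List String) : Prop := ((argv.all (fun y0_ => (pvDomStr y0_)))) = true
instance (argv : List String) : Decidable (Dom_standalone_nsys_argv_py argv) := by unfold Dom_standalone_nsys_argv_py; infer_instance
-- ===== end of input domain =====

-- B replaces A's per-token dispatch loop by search-then-validate (find the first "nsys", then check the head is all global flags); same cost, different decomposition.
-- ===== PORT A =====
-- A's while-loop over idx, ported as structural recursion on the remaining suffix with the prefix accumulator
def pvALoop (pre : List String) (argv : List String) : Option (List String) :=
  match argv with
  | [] => none
  | token :: rest =>
    if token = "nsys" then some (pre ++ rest)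
    else if token = "nsys-sql" then none
    else if token = "--json" ∨ token = "--verbose" ∨ token = "-v" then
      pvALoop (pre ++ [token]) rest
    else none

def standalone_nsys_argv_py (argv : List String) : Option (List String) :=
  pvALoop [] argv

-- ===== PORT B =====
def pvInGlobalFlags (t : String) : Bool := t == "--json" || t == "--verbose" || t == "-v"

def standalone_nsys_argv_py_alt (argv : List String) : Option (List String) :=
  match PySem.List.index? argv "nsys" with
  | none => none            -- argv.index raised ValueError → return None
  | some i =>
    let head := PySem.List.slice argv none (some (i : Int))        -- argv[:i]
    if head.all pvInGlobalFlags then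
      head ++ PySem.List.slice argv (some ((i : Int) + 1)) none    -- head + argv[i+1:]
    else none

-- ===== PRECONDITION & SPEC =====
def Spec_standalone_nsys_argv_py (argv : List String) (out : Option (List String)) : Prop := out = standalone_nsys_argv_py_alt argv
instance (argv : List String) (out : Option (List String)) : Decidable (Spec_standalone_nsys_argv_py argv out) := by unfold Spec_standalone_nsys_argv_py; infer_instance

-- ===== CLAIM (what is proved, stated in full; the proofs are below) =====
def Claim_equal_standalone_nsys_argv_py : Prop := ∀ (argv : List String), Dom_standalone_nsys_argv_py argv → Spec_standalone_nsys_argv_py argv (standalone_nsys_argv_py argv)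

-- ===== LEMMAS AND PROOFS =====
-- B's port with the slices rewritten to take/drop
lemma alt_eq (argv : List String) :
    standalone_nsys_argv_py_alt argv =
      match PySem.List.index? argv "nsys" with
      | none => none
      | some i =>
        if (argv.take i).all pvInGlobalFlags then
          some (argv.take i ++ argv.drop (i + 1))
        else none := by
  unfold standalone_nsys_argv_py_alt
  cases h : PySem.List.index? argv "nsys" with
  | none => rfl
  | some i =>
    have h1 : PySem.List.slice argv none (some (i : Int)) = argv.take i :=
      PySem.List.slice_to_natCast argv i
    have h2 : PySem.List.slice argv (some ((i : Int) + 1)) none = argv.drop (i + 1) := by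
      have : ((i : Int) + 1) = ((i + 1 : Nat) : Int) := by push_cast; ring
      rw [this, PySem.List.slice_from_natCast]
    simp [h1, h2]

lemma pvALoop_eq (argv : List String) : ∀ (pre : List String),
    pvALoop pre argv =
      (match PySem.List.index? argv "nsys" with
       | none => none
       | some i =>
         if (argv.take i).all pvInGlobalFlags then
           some (argv.take i ++ argv.drop (i + 1))
         else none).map (pre ++ ·) := by
  induction argv with
  | nil => intro pre; simp [pvALoop, PySem.List.index?]
  | cons token rest ih =>
    intro pre
    by_cases hn : token = "nsys"
    · subst hn
      rw [PySem.List.index?_cons_self]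
      simp [pvALoop]
    · rw [PySem.List.index?_cons_of_ne rest hn]
      by_cases hg : pvInGlobalFlags token = true
      · have h3 : token = "--json" ∨ token = "--verbose" ∨ token = "-v" := by
          simp [pvInGlobalFlags] at hg; tauto
        have hs : token ≠ "nsys-sql" := by rcases h3 with h|h|h <;> simp [h]
        simp only [pvALoop, if_neg hn, if_neg hs, if_pos h3, ih (pre ++ [token])]
        cases h : PySem.List.index? rest "nsys" with
        | none => simp
        | some i =>
          simp only [Option.map_some, List.take_succ_cons, List.drop_succ_cons,
            List.all_cons, hg, Bool.true_and]
          by_cases ha : (rest.take i).all pvInGlobalFlags = true <;>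
            simp [ha, List.append_assoc]
      · have hno : ¬(token = "--json" ∨ token = "--verbose" ∨ token = "-v") := by
          simp [pvInGlobalFlags] at hg; tauto
        have hgf : pvInGlobalFlags token = false := by
          cases hx : pvInGlobalFlags token with
          | false => rfl
          | true => exact absurd hx hg
        have hA : pvALoop pre (token :: rest) = none := by
          by_cases hs : token = "nsys-sql" <;> simp [pvALoop, hn, hs, hno]
        rw [hA]
        cases h : PySem.List.index? rest "nsys" with
        | none => simp
        | some i => simp [List.take_succ_cons, List.all_cons, hgf]

-- ===== VERDICT (by name: the statement is the Claim_ definition above) =====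
theorem standalone_nsys_argv_py_spec : Claim_equal_standalone_nsys_argv_py := by
  intro argv _
  show standalone_nsys_argv_py argv = standalone_nsys_argv_py_alt argv
  rw [standalone_nsys_argv_py, pvALoop_eq, alt_eq]
  cases PySem.List.index? argv "nsys" with
  | none => rfl
  | some i => by_cases h : (argv.take i).all pvInGlobalFlags = true <;> simp [h]
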